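-- pv_equiv track=rewrite | github.com/aloshdenny/superfloat | src/test/convert_to_stream.py | extract_diagonals_reversed
-- ===== SOURCE A (Python) =====
-- def extract_diagonals_reversed(matrix, hex_digits=4):
--     """
--     Extract diagonals from n×n matrix with elements in reverse order.
--     Same diagonals as extract_diagonals, but each diagonal is reversed.
--
--     Args:
--         matrix: n×n matrix of integer values
--         hex_digits: number of hex digits per element (default 4 for 16-bit values)
--
--     Returns:
--         list of reversed diagonals, each padded to length n
--     """
--     n = len(matrix)
--     diagonals = []
--     padding_str = "0" * hex_digits
--
--     # Total number of diagonals in an n×n matrix is (2n-1)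
--     for d in range(2 * n - 1):
--         diagonal = []
--
--         # Extract diagonal elements (same as first function)
--         for i in range(n):
--             j = d - i
--             if 0 <= j < n:
--                 val = format(matrix[i][j], f'0{hex_digits}X')
--                 diagonal.append(val)
--
--         # Reverse the diagonal elements
--         diagonal = diagonal[::-1]
--
--         # Pad with zeros to make length n
--         padding_needed = n - len(diagonal)
--         if d < n:
--             padded_diagonal = [padding_str] * padding_needed + diagonal
--         else:
--             padded_diagonal = diagonal + [padding_str] * padding_needed
--
--         diagonals.append(padded_diagonal)
--
--     return diagonals
-- ===== SOURCE B (Python) =====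
-- def extract_diagonals_reversed(matrix, hex_digits=4):
--     n = len(matrix)
--     # Bucket pass: one row-major sweep assigns each cell to its anti-diagonal i+j.
--     buckets = [[] for _ in range(2 * n - 1)]
--     for i in range(n):
--         row = matrix[i]
--         for j in range(n):
--             buckets[i + j].append(format(row[j], f'0{hex_digits}X'))
--     padding_str = "0" * hex_digits
--     result = []
--     for d, bucket in enumerate(buckets):
--         bucket.reverse()
--         fill = [padding_str] * (n - len(bucket))
--         result.append(fill + bucket if d < n else bucket + fill)
--     return result
-- ===== Notes on version B (the rewrite author's own statement) =====
-- stated objective: alternative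
-- what changed: B replaces A's per-diagonal rescan of all rows (for each of the 2n-1 diagonals, scan every row index and test the bound) with one row-major sweep that drops each formatted cell into bucket i+j, then a single finishing pass that reverses and pads each bucket.
import Mathlib
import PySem

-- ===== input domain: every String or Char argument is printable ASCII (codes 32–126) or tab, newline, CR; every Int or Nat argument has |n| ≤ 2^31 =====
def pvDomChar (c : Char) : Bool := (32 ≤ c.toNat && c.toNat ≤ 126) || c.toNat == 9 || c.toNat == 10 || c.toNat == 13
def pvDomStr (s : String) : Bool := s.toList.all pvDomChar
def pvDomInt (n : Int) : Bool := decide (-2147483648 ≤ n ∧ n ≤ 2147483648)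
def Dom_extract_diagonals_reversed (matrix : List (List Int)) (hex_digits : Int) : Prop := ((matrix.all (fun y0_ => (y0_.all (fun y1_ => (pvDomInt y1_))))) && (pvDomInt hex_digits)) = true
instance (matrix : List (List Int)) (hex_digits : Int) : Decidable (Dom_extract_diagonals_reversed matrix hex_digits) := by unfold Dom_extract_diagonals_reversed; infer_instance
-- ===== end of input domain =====

-- B builds each anti-diagonal once by a row-major bucket pass instead of A's per-diagonal
-- rescan of every row; same return value (no mutation is observable by the caller).

-- ===== PORT A =====
-- format(m, 'X') for a natural number m, digits in reverse order
def pvHexChar (d : Nat) : Char := if d < 10 then Char.ofNat (48 + d) else Char.ofNat (55 + d)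

def pvHexRev (m : Nat) : List Char :=
  if h : m = 0 then [] else pvHexChar (m % 16) :: pvHexRev (m / 16)
decreasing_by exact Nat.div_lt_self (Nat.pos_of_ne_zero h) (by omega)

def pvHexNat (m : Nat) : List Char := if m = 0 then ['0'] else (pvHexRev m).reverse

-- format(v, f'0{k}X'): uppercase hex, zero-padded to total width k (the sign counts in the width)
def pvFmt (v : Int) (k : Int) : String :=
  if v < 0 then
    let ds := pvHexNat v.natAbs
    String.mk ('-' :: (List.replicate (k.toNat - 1 - ds.length) '0' ++ ds))
  else
    let ds := pvHexNat v.toNat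
    String.mk (List.replicate (k.toNat - ds.length) '0' ++ ds)

def extract_diagonals_reversed (matrix : List (List Int)) (hex_digits : Int) : List (List String) :=
  let n : Int := matrix.length
  let padding_str : String := String.mk (List.replicate hex_digits.toNat '0')
  (PySem.List.pyRange 0 (2 * n - 1)).foldl (fun diagonals d =>
    let diagonal : List String := (PySem.List.pyRange 0 n).foldl (fun diag i =>
      if decide (0 ≤ d - i ∧ d - i < n) = true then
        diag ++ [pvFmt (PySem.List.pyGetD (PySem.List.pyGetD matrix i []) (d - i) 0) hex_digits]
      else diag) []
    let diagonal2 := diagonal.reverse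
    let padding_needed : Int := n - (diagonal2.length : Int)
    let padded := if d < n then List.replicate padding_needed.toNat padding_str ++ diagonal2
                  else diagonal2 ++ List.replicate padding_needed.toNat padding_str
    diagonals ++ [padded]) []

-- ===== PORT B =====
def extract_diagonals_reversed_alt (matrix : List (List Int)) (hex_digits : Int) : List (List String) :=
  let n : Int := matrix.length
  let buckets0 : List (List String) := List.replicate (2 * n - 1).toNat []
  let buckets := (PySem.List.pyRange 0 n).foldl (fun bs i =>
      let row := PySem.List.pyGetD matrix i []
      (PySem.List.pyRange 0 n).foldl (fun bs j =>
        bs.modify (i + j).toNat (fun b => b ++ [pvFmt (PySem.List.pyGetD row j 0) hex_digits])) bs) buckets0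
  let padding_str : String := String.mk (List.replicate hex_digits.toNat '0')
  (PySem.List.enumerate buckets).foldl (fun result db =>
    let b := db.2.reverse
    let fill := List.replicate (((n : Int) - (b.length : Int)).toNat) padding_str
    result ++ [if db.1 < n then fill ++ b else b ++ fill]) []

-- ===== PRECONDITION & SPEC =====
-- Pre_ excludes exactly the inputs where A raises: a negative format width with at least one
-- cell to format (ValueError), and rows shorter than len(matrix) (IndexError on matrix[i][j]).
def Pre_extract_diagonals_reversed (matrix : List (List Int)) (hex_digits : Int) : Prop :=
  (matrix = [] ∨ 0 ≤ hex_digits) ∧ ∀ row ∈ matrix, matrix.length ≤ row.length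
instance (matrix : List (List Int)) (hex_digits : Int) : Decidable (Pre_extract_diagonals_reversed matrix hex_digits) := by unfold Pre_extract_diagonals_reversed; infer_instance

def pvWitness_extract_diagonals_reversed : List (List Int) × Int := ([[1, 255], [-3, 65535]], 4)

def Spec_extract_diagonals_reversed (matrix : List (List Int)) (hex_digits : Int) (out : List (List String)) : Prop := out = extract_diagonals_reversed_alt matrix hex_digits
instance (matrix : List (List Int)) (hex_digits : Int) (out : List (List String)) : Decidable (Spec_extract_diagonals_reversed matrix hex_digits out) := by unfold Spec_extract_diagonals_reversed; infer_instance

-- ===== CLAIM (what is proved, stated in full; the proofs are below) =====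
def Claim_equal_extract_diagonals_reversed : Prop := ∀ (matrix : List (List Int)) (hex_digits : Int), Dom_extract_diagonals_reversed matrix hex_digits → Pre_extract_diagonals_reversed matrix hex_digits → Spec_extract_diagonals_reversed matrix hex_digits (extract_diagonals_reversed matrix hex_digits)

-- ===== LEMMAS AND PROOFS =====

-- generic: filter-then-map as a flatMap
theorem pv_filter_map_flatMap {α β : Type} (p : α → Bool) (f : α → β) (l : List α) :
    (l.filter p).map f = l.flatMap (fun x => if p x then [f x] else []) := by
  induction l with
  | nil => rfl
  | cons a l ih => by_cases h : p a <;> simp [h, ih]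

-- a fold whose every step appends C i d at index d, seen through getElem?
theorem pv_getElem?_foldl_step {β : Type} (F : List (List String) → β → List (List String))
    (C : β → Nat → List String)
    (h : ∀ bs i d, (F bs i)[d]? = bs[d]?.map (fun b => b ++ C i d)) :
    ∀ (L : List β) (bs : List (List String)) (d : Nat),
      (L.foldl F bs)[d]? = bs[d]?.map (fun b => b ++ L.flatMap (fun i => C i d)) := by
  intro L
  induction L with
  | nil => intro bs d; simp
  | cons a L ih =>
      intro bs d
      simp only [List.foldl_cons, ih (F bs a) d, h bs a d, List.flatMap_cons]
      cases bs[d]? <;> simp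

-- modify-append seen through getElem?
theorem pv_getElem?_modify_append (p : Nat) (x : String) (bs : List (List String)) (d : Nat) :
    (bs.modify p (fun b => b ++ [x]))[d]? =
      bs[d]?.map (fun b => b ++ (if p = d then [x] else [])) := by
  rw [List.getElem?_modify]
  by_cases h : p = d <;> cases bs[d]? <;> simp [h]

-- collapsing a flatMap over range that fires at exactly one index
theorem pv_flatMap_range_single {α : Type} (N c : Nat) (g : Nat → List α) :
    (List.range N).flatMap (fun j => if j = c then g j else []) = if c < N then g c else [] := by
  induction N with
  | zero => simp
  | succ N ih =>
      rw [List.range_succ, List.flatMap_append, ih]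
      by_cases h1 : c < N
      · have h2 : ¬ N = c := by omega
        have h3 : c < N + 1 := by omega
        simp [h1, h2, h3]
      · by_cases h2 : N = c
        · have h3 : c < N + 1 := by omega
          simp [h2]
        · have h3 : ¬ c < N + 1 := by omega
          simp [h1, h2, h3]

-- enumerate of a map
theorem pv_enumerate_map {α β : Type} (f : α → β) (l : List α) (s : Int) :
    PySem.List.enumerate (l.map f) s = (PySem.List.enumerate l s).map (fun p => (p.1, f p.2)) := by
  induction l generalizing s with
  | nil => rfl
  | cons a l ih => simp only [List.map_cons, PySem.List.enumerate, ih]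

-- enumerate of range starting at 0
theorem pv_enumerate_append_singleton {α : Type} (l : List α) (a : α) (s : Int) :
    PySem.List.enumerate (l ++ [a]) s = PySem.List.enumerate l s ++ [(s + l.length, a)] := by
  induction l generalizing s with
  | nil => simp [PySem.List.enumerate]
  | cons b l ih =>
      simp only [List.cons_append, PySem.List.enumerate, ih, List.length_cons]
      have : s + ((l.length : Int) + 1) = s + 1 + l.length := by ring
      push_cast
      rw [this]

theorem pv_enumerate_range (M : Nat) :
    PySem.List.enumerate (List.range M) 0 = (List.range M).map (fun d : Nat => ((d : Int), d)) := by
  induction M with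
  | zero => rfl
  | succ M ih => rw [List.range_succ, pv_enumerate_append_singleton, ih, List.map_append]; simp

-- the anti-diagonal d of the matrix, formatted, in increasing row order
def pvDiag (matrix : List (List Int)) (k : Int) (d : Nat) : List String :=
  (List.range matrix.length).flatMap (fun i =>
    if i ≤ d ∧ d < i + matrix.length then
      [pvFmt ((matrix.getD i []).getD (d - i) 0) k] else [])

-- A's inner fold computes pvDiag
theorem pv_A_diag (matrix : List (List Int)) (k : Int) (d : Nat) :
    List.foldl
      (fun diag i =>
        if decide (0 ≤ (d : Int) - i ∧ (d : Int) - i < (matrix.length : Int)) = true then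
          diag ++ [pvFmt (PySem.List.pyGetD (PySem.List.pyGetD matrix i []) ((d : Int) - i) 0) k]
        else diag)
      [] (List.map (fun j : Nat => (j : Int)) (List.range matrix.length)) =
    pvDiag matrix k d := by
  rw [List.foldl_map, PySem.List.foldl_append_if, List.nil_append, pv_filter_map_flatMap, pvDiag]
  apply List.flatMap_congr
  intro i hi
  rw [List.mem_range] at hi
  by_cases h : i ≤ d ∧ d < i + matrix.length
  · have he : (d : Int) - (i : Int) = ((d - i : Nat) : Int) := by omega
    have hc : (0 ≤ ((d - i : Nat) : Int) ∧ ((d - i : Nat) : Int) < (matrix.length : Int)) := by omega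
    simp only [decide_eq_true_eq, he, PySem.List.pyGetD_natCast]
    rw [if_pos hc, if_pos h]
  · have hc : ¬ (0 ≤ (d : Int) - (i : Int) ∧ (d : Int) - (i : Int) < (matrix.length : Int)) := by omega
    simp only [hc, decide_false, Bool.false_eq_true, if_false, h]

-- B's bucket-building double fold produces exactly the pvDiag lists
theorem pv_B_buckets (matrix : List (List Int)) (k : Int) :
    List.foldl
      (fun bs i =>
        List.foldl
          (fun bs j =>
            bs.modify (i + j).toNat fun b =>
              b ++ [pvFmt (PySem.List.pyGetD (PySem.List.pyGetD matrix i []) j 0) k])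
          bs (List.map (fun j : Nat => (j : Int)) (List.range matrix.length)))
      (List.replicate (2 * (matrix.length : Int) - 1).toNat [])
      (List.map (fun j : Nat => (j : Int)) (List.range matrix.length)) =
    (List.range (2 * matrix.length - 1)).map (pvDiag matrix k) := by
  have hrow : ∀ (bs : List (List String)) (i : Int) (d : Nat),
      (List.foldl
        (fun bs j =>
          bs.modify (i + j).toNat fun b =>
            b ++ [pvFmt (PySem.List.pyGetD (PySem.List.pyGetD matrix i []) j 0) k])
        bs (List.map (fun j : Nat => (j : Int)) (List.range matrix.length)))[d]? =
      bs[d]?.map (fun b => b ++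
        (List.map (fun j : Nat => (j : Int)) (List.range matrix.length)).flatMap
          (fun j => if (i + j).toNat = d then
            [pvFmt (PySem.List.pyGetD (PySem.List.pyGetD matrix i []) j 0) k] else [])) := by
    intro bs i d
    exact pv_getElem?_foldl_step
      (fun bs j => bs.modify (i + j).toNat fun b =>
        b ++ [pvFmt (PySem.List.pyGetD (PySem.List.pyGetD matrix i []) j 0) k])
      (fun j d => if (i + j).toNat = d then
        [pvFmt (PySem.List.pyGetD (PySem.List.pyGetD matrix i []) j 0) k] else [])
      (fun bs j d => pv_getElem?_modify_append (i + j).toNat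
        (pvFmt (PySem.List.pyGetD (PySem.List.pyGetD matrix i []) j 0) k) bs d)
      _ bs d
  apply List.ext_getElem?
  intro d
  rw [pv_getElem?_foldl_step _ _ hrow, List.getElem?_map, List.getElem?_replicate]
  have hlen : (2 * (matrix.length : Int) - 1).toNat = 2 * matrix.length - 1 := by omega
  rw [hlen]
  by_cases hd : d < 2 * matrix.length - 1
  · rw [List.getElem?_range hd]
    simp only [if_pos hd, Option.map_some]
    congr 1
    rw [List.flatMap_map, pvDiag]
    apply List.flatMap_congr
    intro i hi
    rw [List.mem_range] at hi
    by_cases h : i ≤ d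
    · have hcong : ∀ j ∈ List.range matrix.length,
          (if ((i : Int) + (j : Int)).toNat = d then
            [pvFmt (PySem.List.pyGetD (PySem.List.pyGetD matrix (i : Int) []) (j : Int) 0) k] else []) =
          (if j = d - i then
            [pvFmt ((matrix.getD i []).getD j 0) k] else []) := by
        intro j hj
        by_cases hje : j = d - i
        · subst hje
          have hT : ((i : Int) + ((d - i : Nat) : Int)).toNat = d := by omega
          simp [hT, PySem.List.pyGetD_natCast]
        · have : ¬ ((i : Int) + (j : Int)).toNat = d := by omega
          simp only [this, hje, if_false]
      rw [List.flatMap_map, List.flatMap_congr hcong, pv_flatMap_range_single]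
      by_cases h2 : d - i < matrix.length
      · have h3 : i ≤ d ∧ d < i + matrix.length := by omega
        simp only [if_pos h2, if_pos h3]
      · have h3 : ¬ (i ≤ d ∧ d < i + matrix.length) := by omega
        simp only [if_neg h2, if_neg h3]
    · have h3 : ¬ (i ≤ d ∧ d < i + matrix.length) := by omega
      rw [if_neg h3, List.flatMap_map]
      have : ∀ j ∈ List.range matrix.length,
          (if ((i : Int) + (j : Int)).toNat = d then
            [pvFmt (PySem.List.pyGetD (PySem.List.pyGetD matrix (i : Int) []) (j : Int) 0) k] else []) =
          ([] : List String) := by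
        intro j hj
        have : ¬ ((i : Int) + (j : Int)).toNat = d := by omega
        simp only [this, if_false]
      rw [List.flatMap_congr this]
      simp
  · rw [List.getElem?_eq_none (by simpa using hd)]
    simp [hd]

theorem pv_main (matrix : List (List Int)) (k : Int) :
    extract_diagonals_reversed matrix k = extract_diagonals_reversed_alt matrix k := by
  rcases Nat.eq_zero_or_pos matrix.length with h0 | hN
  · rw [List.length_eq_zero_iff] at h0
    subst h0
    simp [extract_diagonals_reversed, extract_diagonals_reversed_alt]
  · have hM : (2 * (matrix.length : Int) - 1) = ((2 * matrix.length - 1 : Nat) : Int) := by omega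
    simp only [extract_diagonals_reversed, extract_diagonals_reversed_alt,
      PySem.List.pyRange_zero_natCast, PySem.List.foldl_append_singleton_eq_map,
      List.nil_append]
    rw [pv_B_buckets, pv_enumerate_map, pv_enumerate_range, List.map_map, List.map_map]
    rw [hM, PySem.List.pyRange_zero_natCast, List.map_map]
    apply List.map_congr_left
    intro d hd
    simp only [Function.comp]
    rw [pv_A_diag]

-- ===== VERDICT (by name: the statement is the Claim_ definition above) =====
theorem extract_diagonals_reversed_spec : Claim_equal_extract_diagonals_reversed := by
  intro matrix hex_digits _ _
  unfold Spec_extract_diagonals_reversed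
  exact pv_main matrix hex_digits
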